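-- pv_equiv track=rewrite | github.com/james5635/GeekForGeek-Data-Structure-and-Algorithm | hashing/medium/largest_fibonacci_subset/solution.py | largest_fibonacci_subset_hash
-- ===== SOURCE A (Python) =====
-- def largest_fibonacci_subset_hash(arr):
--     """
--     Find largest Fibonacci subset using hash set approach.
--
--     Args:
--         arr: List of integers
--
--     Returns:
--         List of Fibonacci numbers from array
--     """
--     if not arr:
--         return []
--
--     max_val = max(arr)
--
--     # Generate all Fibonacci numbers up to max_val
--     fib_set = set()
--     a, b = 0, 1
--
--     while a <= max_val:
--         fib_set.add(a)
--         a, b = b, a + b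
--
--     # Filter array to keep only Fibonacci numbers
--     return [x for x in arr if x in fib_set]
-- ===== SOURCE B (Python) =====
-- def _is_fib(x):
--     """Climb the Fibonacci sequence until it reaches or passes x."""
--     a, b = 0, 1
--     while a < x:
--         a, b = b, a + b
--     return a == x
--
--
-- def largest_fibonacci_subset_hash(arr):
--     return [x for x in arr if _is_fib(x)]
-- ===== Notes on version B (the rewrite author's own statement) =====
-- stated objective: simpler
-- what changed: Replaces the global max() pass plus a precomputed Fibonacci hash set with a per-element helper that climbs the Fibonacci sequence until it reaches or passes x, so no max, no set and no empty-list guard are needed.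
import Mathlib
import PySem

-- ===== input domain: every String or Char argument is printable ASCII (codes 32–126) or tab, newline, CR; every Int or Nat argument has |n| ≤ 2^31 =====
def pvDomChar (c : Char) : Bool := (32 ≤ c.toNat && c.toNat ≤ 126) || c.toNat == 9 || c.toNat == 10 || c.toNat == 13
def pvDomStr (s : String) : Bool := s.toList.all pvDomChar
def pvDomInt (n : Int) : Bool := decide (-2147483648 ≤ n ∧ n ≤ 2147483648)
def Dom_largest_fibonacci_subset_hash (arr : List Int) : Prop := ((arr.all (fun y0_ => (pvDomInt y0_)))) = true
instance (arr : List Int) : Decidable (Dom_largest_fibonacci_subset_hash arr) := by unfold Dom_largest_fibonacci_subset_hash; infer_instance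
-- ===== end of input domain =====

-- B changes the decomposition (per-element Fibonacci climb instead of a global max + precomputed set); no speed claim.

-- ===== PORT A =====
-- A's while loop 'while a <= max_val: fib_set.add(a); a, b = b, a + b' starting from (0, 1).
-- The dite guard (0 ≤ a ∧ 0 < b ∧ a ≤ b) is a totality guard only: it holds on every state the
-- Python loop reaches from (0, 1), and makes the recursion well-founded.
def fibSetUpTo (maxv a b : Int) : PySem.Set Int :=
  if a ≤ maxv then
    if h : 0 ≤ a ∧ 0 < b ∧ a ≤ b then
      PySem.Set.add (fibSetUpTo maxv b (a + b)) a
    else [a]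
  else []
termination_by ((maxv + 1 - a).toNat, (maxv + 1 - b).toNat)
decreasing_by
  rcases h with ⟨ha, hb, hab⟩
  rcases lt_or_eq_of_le hab with h' | h'
  · exact Prod.Lex.left _ _ (by omega)
  · subst h'; exact Prod.Lex.right _ (by omega)

def largest_fibonacci_subset_hash (arr : List Int) : List Int :=
  if arr = [] then []
  else
    match PySem.List.max? arr (fun y => y) with
    | none => []
    | some maxv =>
      let fibSet := fibSetUpTo maxv 0 1
      arr.filter (fun x => PySem.Set.contains fibSet x)

-- ===== PORT B =====
-- Source B's _is_fib: 'a, b = 0, 1; while a < x: a, b = b, a + b; return a == x'.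
-- Same totality guard as above, for the same reason.
def isFibLoop (x a b : Int) : Bool :=
  if a < x then
    if h : 0 ≤ a ∧ 0 < b ∧ a ≤ b then isFibLoop x b (a + b)
    else a == x
  else a == x
termination_by ((x - a).toNat, (x - b).toNat)
decreasing_by
  rcases h with ⟨ha, hb, hab⟩
  rcases lt_or_eq_of_le hab with h' | h'
  · exact Prod.Lex.left _ _ (by omega)
  · subst h'; exact Prod.Lex.right _ (by omega)

def isFib (x : Int) : Bool := isFibLoop x 0 1

def largest_fibonacci_subset_hash_alt (arr : List Int) : List Int :=
  arr.filter (fun x => isFib x)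

-- ===== PRECONDITION & SPEC =====
def Spec_largest_fibonacci_subset_hash (arr : List Int) (out : List Int) : Prop := out = largest_fibonacci_subset_hash_alt arr
instance (arr : List Int) (out : List Int) : Decidable (Spec_largest_fibonacci_subset_hash arr out) := by unfold Spec_largest_fibonacci_subset_hash; infer_instance

-- ===== CLAIM (what is proved, stated in full; the proofs are below) =====
def Claim_equal_largest_fibonacci_subset_hash : Prop := ∀ (arr : List Int), Dom_largest_fibonacci_subset_hash arr → Spec_largest_fibonacci_subset_hash arr (largest_fibonacci_subset_hash arr)

-- ===== LEMMAS AND PROOFS =====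

-- every element of the generated set is ≥ a
theorem fibSetUpTo_mem_ge (maxv a b y : Int) (hy : y ∈ fibSetUpTo maxv a b)
    (ha : 0 ≤ a) (hab : a ≤ b) : a ≤ y := by
  revert hy ha hab
  induction a, b using fibSetUpTo.induct maxv with
  | case1 a b hle h ih =>
    intro hy ha hab
    rw [fibSetUpTo, if_pos hle, dif_pos h] at hy
    rcases (PySem.Set.mem_add _ _ _).mp hy with h' | h'
    · have := ih h' (by omega) (by omega); omega
    · omega
  | case2 a b hle h =>
    intro hy ha hab
    rw [fibSetUpTo, if_pos hle, dif_neg h] at hy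
    simp at hy; omega
  | case3 a b hle =>
    intro hy ha hab
    rw [fibSetUpTo, if_neg hle] at hy
    simp at hy

-- membership in the generated set agrees with B's climbing loop, for x ≤ maxv
theorem mem_fibSetUpTo_iff (maxv a b x : Int) (ha : 0 ≤ a) (hb : 0 < b) (hab : a ≤ b)
    (hx : x ≤ maxv) : (x ∈ fibSetUpTo maxv a b) ↔ isFibLoop x a b = true := by
  revert ha hb hab
  induction a, b using fibSetUpTo.induct maxv with
  | case1 a b hle h ih =>
    intro ha hb hab
    rw [fibSetUpTo, if_pos hle, dif_pos h]
    rcases h with ⟨ha', hb', hab'⟩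
    rw [PySem.Set.mem_add _ _ _]
    rcases lt_trichotomy x a with hxa | hxa | hxa
    · -- x < a: not in set (all elements ≥ b ≥ a > x), loop stops with a ≠ x
      rw [isFibLoop, if_neg (by omega)]
      constructor
      · rintro (hmem | rfl)
        · exact absurd (fibSetUpTo_mem_ge maxv b (a + b) x hmem (by omega) (by omega)) (by omega)
        · omega
      · intro hbeq; exfalso; simp at hbeq; omega
    · -- x = a: in set, loop returns a == x = true
      subst hxa
      rw [isFibLoop, if_neg (by omega)]
      simp
    · -- a < x: both step
      rw [isFibLoop, if_pos hxa, dif_pos ⟨ha', hb', hab'⟩]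
      have := ih (by omega) (by omega) (by omega)
      constructor
      · rintro (hmem | rfl)
        · exact this.mp hmem
        · omega
      · intro hloop; exact Or.inl (this.mpr hloop)
  | case2 a b hle h => intro ha hb hab; exact absurd ⟨ha, hb, hab⟩ h
  | case3 a b hle =>
    intro ha hb hab
    -- maxv < a, so x < a: both sides false
    rw [fibSetUpTo, if_neg hle, isFibLoop, if_neg (by omega)]
    simp; omega

-- ===== VERDICT (by name: the statement is the Claim_ definition above) =====
theorem largest_fibonacci_subset_hash_spec : Claim_equal_largest_fibonacci_subset_hash := by
  intro arr _
  unfold Spec_largest_fibonacci_subset_hash largest_fibonacci_subset_hash largest_fibonacci_subset_hash_alt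
  by_cases harr : arr = []
  · subst harr; rfl
  · rw [if_neg harr]
    rcases hmax : PySem.List.max? arr (fun y => y) with _ | maxv
    · exact absurd ((PySem.List.max?_eq_none_iff _ _).mp hmax) harr
    · have hbound := PySem.List.max?_isMax hmax
      apply List.filter_congr
      intro x hx
      show (fibSetUpTo maxv 0 1).contains x = isFib x
      rw [Bool.eq_iff_iff, PySem.Set.contains_iff]
      unfold isFib
      exact mem_fibSetUpTo_iff maxv 0 1 x (by omega) (by omega) (by omega) (hbound x hx)
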